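-- pv_equiv track=rewrite | github.com/Anshelen/algorithms-explore | dynamic/backpack.py | find_with_repeats_recursive
-- ===== SOURCE A (Python) =====
-- from typing import List, Tuple
--
-- Item = Tuple[int, int]
--
-- def find_with_repeats_recursive(items: List[Item], weight: int):
--     """
--     Возвращает оптимальное заполнение рюкзака с повторениями рекурсивным методом
--     (сверху вниз).
--
--     :param items: список предметов в виде кортежей (weight, price)
--     :param weight: вместимость рюкзака
--     :return: список предметов, обеспечивающих оптимальное заполнение
--     """
--     # Хранит weight: (price, [optimal items])
--     d = {}
--
--     def _find(items, weight):
--         if weight not in d: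
--             d[weight] = (0, [])
--             for item in items:
--                 item_weight, item_price = item[0], item[1]
--                 if item_weight <= weight:
--                     # Оптимальный поднабор при условии, что item в оптимальном
--                     # наборе
--                     _opt = _find(items, weight - item_weight)
--                     _opt_price = _opt[0] + item_price
--                     if _opt_price > d[weight][0]:
--                         d[weight] = (_opt_price, _opt[1] + [item])
--         return d[weight]
--
--     res = _find(items, weight)[1]
--     res.reverse()
--     return res
-- ===== SOURCE B (Python) =====
-- def find_with_repeats_recursive(items, weight):
--     """Iterative unbounded-knapsack DP over the reachable capacities only:
--     worklist reachability, a value table with parent pointers filled in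
--     increasing capacity order, and a single reconstruction pass at the end
--     (no recursion, no per-cell list copying)."""
--     # 1. capacities reachable from `weight` by removing one item at a time
--     seen = {weight}
--     stack = [weight]
--     while stack:
--         w = stack.pop()
--         for item in items:
--             iw = item[0]
--             if 1 <= iw <= w and (w - iw) not in seen:
--                 seen.add(w - iw)
--                 stack.append(w - iw)
--     # 2. best value and chosen item per reachable capacity, small to large
--     best, choice = {}, {}
--     for w in sorted(seen):
--         b, c = 0, None
--         for item in items:
--             iw = item[0]
--             if 1 <= iw <= w:
--                 cand = best[w - iw] + item[1]
--                 if cand > b: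
--                     b, c = cand, item
--         best[w], choice[w] = b, c
--     # 3. reconstruct the optimal filling once
--     res, w = [], weight
--     while choice[w] is not None:
--         item = choice[w]
--         res.append(item)
--         w -= item[0]
--     return res
-- ===== Notes on version B (the rewrite author's own statement) =====
-- stated objective: faster
-- what changed: Replaces A's top-down memoised recursion, which copies the optimal item list into every memo entry, by an iterative worklist-plus-sorted-table DP over the reachable capacities with parent pointers, reconstructing the solution once at the end.
-- outside the precondition, e.g. on find_with_repeats_recursive([(0, 5)], 3): A returns [(0, 5)], B returns []; on find_with_repeats_recursive([(-1, 1)], 0): A raises RecursionError, B returns []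
import Mathlib
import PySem

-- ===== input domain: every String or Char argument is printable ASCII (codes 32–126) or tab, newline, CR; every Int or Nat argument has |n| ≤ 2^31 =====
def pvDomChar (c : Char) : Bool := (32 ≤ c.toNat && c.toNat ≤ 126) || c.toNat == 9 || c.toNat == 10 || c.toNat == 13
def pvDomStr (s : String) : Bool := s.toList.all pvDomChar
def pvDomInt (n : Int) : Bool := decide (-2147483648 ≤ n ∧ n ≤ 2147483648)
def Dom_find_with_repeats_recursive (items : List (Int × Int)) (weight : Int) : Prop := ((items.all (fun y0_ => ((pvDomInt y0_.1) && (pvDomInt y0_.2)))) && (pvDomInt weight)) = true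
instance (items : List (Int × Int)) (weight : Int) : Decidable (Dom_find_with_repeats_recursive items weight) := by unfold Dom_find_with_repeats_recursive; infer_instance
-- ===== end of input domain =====

-- B replaces A's top-down memoised recursion (which copies the optimal item list into every
-- memo entry) by an iterative DP over the reachable capacities with parent pointers,
-- reconstructing the solution once at the end.

-- ===== PORT A =====
-- A's memo dict `d` maps weight ↦ (price, optimal items).  The recursion depth of the Python is
-- bounded by weight+1 inside Pre_ (all item weights ≥ 1), so fuel = weight.toNat+1 at the top
-- call is never exhausted there; the 0-fuel branch is unreachable on admitted inputs.
def pvAfind (items : List (Int × Int)) :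
    Nat → Int → PySem.Dict Int (Int × List (Int × Int)) →
    ((Int × List (Int × Int)) × PySem.Dict Int (Int × List (Int × Int)))
  | 0, w, d => (d.getD w (0, []), d)
  | fuel+1, w, d =>
    match d.get? w with
    | some v => (v, d)
    | none =>
      let d1 := d.insert w (0, [])
      let d2 := items.foldl (fun d item =>
        if item.1 ≤ w then
          let r := pvAfind items fuel (w - item.1) d
          let optPrice := r.1.1 + item.2
          if (r.2.getD w (0, [])).1 < optPrice then
            r.2.insert w (optPrice, r.1.2 ++ [item])
          else r.2
        else d) d1
      (d2.getD w (0, []), d2)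

def find_with_repeats_recursive (items : List (Int × Int)) (weight : Int) : List (Int × Int) :=
  ((pvAfind items (weight.toNat + 1) weight PySem.Dict.empty).1.2).reverse

-- ===== PORT B =====
-- the `while stack:` reachability worklist of Source B; each pass pops one capacity and each item
-- can discover at most one new capacity, all within [0, weight], so the fuel below is never
-- exhausted (proved in pvBreach_main)
def pvBreach (items : List (Int × Int)) : Nat → List Int → PySem.Set Int → PySem.Set Int
  | 0, _, seen => seen
  | fuel+1, stack, seen =>
    if h : stack = [] then seen
    else
      -- Python's list.pop() takes the LAST element
      let w := stack.getLast h
      let st := items.foldl (fun (st : List Int × PySem.Set Int) item =>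
        if 1 ≤ item.1 ∧ item.1 ≤ w ∧ st.2.contains (w - item.1) = false then
          (st.1 ++ [w - item.1], st.2.add (w - item.1))
        else st) (stack.dropLast, seen)
      pvBreach items fuel st.1 st.2

-- the `for w in sorted(seen)` loop filling the best / choice dicts
def pvBtables (items : List (Int × Int)) (ws : List Int) :
    PySem.Dict Int Int × PySem.Dict Int (Option (Int × Int)) :=
  ws.foldl (fun td w =>
    let bc := items.foldl (fun (acc : Int × Option (Int × Int)) item =>
      if 1 ≤ item.1 ∧ item.1 ≤ w then
        -- best[w - item.1]: the key is always present here (proved below), so getD is exact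
        let cand := td.1.getD (w - item.1) 0 + item.2
        if acc.1 < cand then (cand, some item) else acc
      else acc) (0, none)
    (td.1.insert w bc.1, td.2.insert w bc.2)) (PySem.Dict.empty, PySem.Dict.empty)

-- the reconstruction `while choice[w] is not None` loop; each step lowers w by item.1 ≥ 1 and
-- stays on reachable capacities (choice[w] never raises KeyError there, proved below), so
-- fuel = weight.toNat+1 suffices
def pvBrebuild (choice : PySem.Dict Int (Option (Int × Int))) : Nat → Int → List (Int × Int)
  | 0, _ => []
  | fuel+1, w =>
    match choice.getD w none with
    | none => []
    | some item => item :: pvBrebuild choice fuel (w - item.1)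

def find_with_repeats_recursive_alt (items : List (Int × Int)) (weight : Int) : List (Int × Int) :=
  let seen := pvBreach items (2 * (weight.toNat + 1) + 1) [weight] (PySem.Set.ofList [weight])
  let tables := pvBtables items (PySem.List.sorted seen (fun x => x) false)
  pvBrebuild tables.2 (weight.toNat + 1) weight

-- ===== PRECONDITION & SPEC =====
-- Pre_ excludes (i) negative-weight items that fit (p.1 ≤ weight), on which A recurses without
-- bound and raises RecursionError, and (ii) zero-weight items of positive price, a corner where
-- the optimal value is unbounded so no correct output exists and A's and B's finite answers are
-- two arbitrary choices.
def Pre_find_with_repeats_recursive (items : List (Int × Int)) (weight : Int) : Prop :=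
  ∀ p ∈ items, (0 ≤ p.1 ∨ weight < p.1) ∧ (p.1 = 0 → p.2 ≤ 0)
instance (items : List (Int × Int)) (weight : Int) : Decidable (Pre_find_with_repeats_recursive items weight) := by unfold Pre_find_with_repeats_recursive; infer_instance

def pvWitness_find_with_repeats_recursive : (List (Int × Int)) × Int := ([(2, 3), (3, 5)], 7)

def Spec_find_with_repeats_recursive (items : List (Int × Int)) (weight : Int) (out : List (Int × Int)) : Prop := out = find_with_repeats_recursive_alt items weight
instance (items : List (Int × Int)) (weight : Int) (out : List (Int × Int)) : Decidable (Spec_find_with_repeats_recursive items weight out) := by unfold Spec_find_with_repeats_recursive; infer_instance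

-- ===== CLAIM (what is proved, stated in full; the proofs are below) =====
def Claim_equal_find_with_repeats_recursive : Prop := ∀ (items : List (Int × Int)) (weight : Int), Dom_find_with_repeats_recursive items weight → Pre_find_with_repeats_recursive items weight → Spec_find_with_repeats_recursive items weight (find_with_repeats_recursive items weight)

-- ===== LEMMAS AND PROOFS =====

-- Mathematical model: the true DP value pvV items w = (optimal price, A's optimal item list).
-- pvStepA is the pure version of A's inner `for item in items` improvement fold.
def pvStepA (items : List (Int × Int)) (f : Int → Int × List (Int × Int)) (w : Int)
    (init : Int × List (Int × Int)) : Int × List (Int × Int) :=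
  items.foldl (fun acc item =>
    if 1 ≤ item.1 ∧ item.1 ≤ w then
      let r := f (w - item.1)
      let p := r.1 + item.2
      if acc.1 < p then (p, r.2 ++ [item]) else acc
    else acc) init

def pvVf (items : List (Int × Int)) : Nat → Int → Int × List (Int × Int)
  | 0, _ => (0, [])
  | n+1, w => pvStepA items (pvVf items n) w (0, [])

def pvV (items : List (Int × Int)) (w : Int) : Int × List (Int × Int) :=
  pvVf items (w.toNat + 1) w

lemma pvStepA_congr (items : List (Int × Int)) (f g : Int → Int × List (Int × Int)) (w : Int)
    (init : Int × List (Int × Int))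
    (h : ∀ it ∈ items, 1 ≤ it.1 → it.1 ≤ w → f (w - it.1) = g (w - it.1)) :
    pvStepA items f w init = pvStepA items g w init := by
  unfold pvStepA
  apply PySem.List.foldl_congr_mem
  intro acc x hx
  by_cases hle : 1 ≤ x.1 ∧ x.1 ≤ w
  · simp [hle, h x hx hle.1 hle.2]
  · simp [hle]

lemma pvVf_stable (items : List (Int × Int)) :
    ∀ n m (w : Int), w.toNat < n → w.toNat < m → pvVf items n w = pvVf items m w := by
  intro n
  induction n using Nat.strong_induction_on with
  | _ n ih =>
    intro m w hn hm
    cases n with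
    | zero => omega
    | succ n' =>
      cases m with
      | zero => omega
      | succ m' =>
        show pvStepA items (pvVf items n') w (0, []) = pvStepA items (pvVf items m') w (0, [])
        apply pvStepA_congr
        intro it hit h1 hle
        exact ih n' (by omega) m' (w - it.1) (by omega) (by omega)

lemma pvV_eq (items : List (Int × Int)) (w : Int) :
    pvV items w = pvStepA items (pvV items) w (0, []) := by
  show pvStepA items (pvVf items w.toNat) w (0, []) = _
  apply pvStepA_congr
  intro it hit h1 hle
  exact pvVf_stable items _ _ _ (by omega) (by omega)

lemma pvStepA_of_none (items : List (Int × Int)) (f : Int → Int × List (Int × Int)) (w : Int)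
    (init : Int × List (Int × Int)) (h : ∀ it ∈ items, ¬ (1 ≤ it.1 ∧ it.1 ≤ w)) :
    pvStepA items f w init = init := by
  unfold pvStepA
  refine Eq.trans (PySem.List.foldl_congr_mem _ _ (fun acc _ => acc) init ?_)
    (PySem.List.foldl_ignore _ _)
  intro acc x hx
  simp [h x hx]

lemma pvV_nonpos (items : List (Int × Int)) (w : Int) (hw : w ≤ 0) :
    pvV items w = (0, []) := by
  rw [pvV_eq items]
  apply pvStepA_of_none
  intro it hit
  omega

-- ===== A-side: the memoised recursion computes pvV =====
-- a call on a weight already in the memo returns the stored (possibly in-progress) entry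
lemma pvAfind_memo (items : List (Int × Int)) (fu : Nat) (w : Int)
    (d : PySem.Dict Int (Int × List (Int × Int))) (acc : Int × List (Int × Int))
    (h : d.get? w = some acc) : pvAfind items fu w d = (acc, d) := by
  cases fu with
  | zero =>
    show (d.getD w (0, []), d) = (acc, d)
    rw [PySem.Dict.getD_of_get?_eq_some _ _ h]
  | succ fu => simp only [pvAfind, h]

lemma pvA_main (items : List (Int × Int)) (hP0 : ∀ p ∈ items, 0 ≤ p.1)
    (hPz : ∀ p ∈ items, p.1 = 0 → p.2 ≤ 0) :
    ∀ fuel (w : Int) (d : PySem.Dict Int (Int × List (Int × Int))), w.toNat < fuel →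
    (∀ k v, d.get? k = some v → k ≤ w → v = pvV items k) →
    (pvAfind items fuel w d).1 = pvV items w ∧
    (∀ k, w < k → (pvAfind items fuel w d).2.get? k = d.get? k) ∧
    (∀ k v, (pvAfind items fuel w d).2.get? k = some v → k ≤ w → v = pvV items k) := by
  intro fuel
  induction fuel using Nat.strong_induction_on with
  | _ fuel ih =>
    intro w d hfuel hd
    cases fuel with
    | zero => omega
    | succ fu =>
      cases hw : d.get? w with
      | some v =>
        have hv : v = pvV items w := hd w v hw le_rfl
        simp only [pvAfind, hw]
        exact ⟨hv, by intros; trivial, hd⟩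
      | none =>
        simp only [pvAfind, hw]
        -- the fold over the items, starting from d.insert w (0, [])
        have inner : ∀ (l : List (Int × Int)), (∀ it ∈ l, it ∈ items) →
            ∀ (acc : Int × List (Int × Int)) (d0 : PySem.Dict Int (Int × List (Int × Int))),
            d0.get? w = some acc →
            (∀ k v, d0.get? k = some v → k < w → v = pvV items k) →
            (l.foldl (fun d item =>
              if item.1 ≤ w then
                let r := pvAfind items fu (w - item.1) d
                let optPrice := r.1.1 + item.2
                if (r.2.getD w (0, [])).1 < optPrice then
                  r.2.insert w (optPrice, r.1.2 ++ [item])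
                else r.2
              else d) d0).get? w = some (pvStepA l (pvV items) w acc) ∧
            (∀ k, w < k → (l.foldl (fun d item =>
              if item.1 ≤ w then
                let r := pvAfind items fu (w - item.1) d
                let optPrice := r.1.1 + item.2
                if (r.2.getD w (0, [])).1 < optPrice then
                  r.2.insert w (optPrice, r.1.2 ++ [item])
                else r.2
              else d) d0).get? k = d0.get? k) ∧
            (∀ k v, (l.foldl (fun d item =>
              if item.1 ≤ w then
                let r := pvAfind items fu (w - item.1) d
                let optPrice := r.1.1 + item.2
                if (r.2.getD w (0, [])).1 < optPrice then
                  r.2.insert w (optPrice, r.1.2 ++ [item])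
                else r.2
              else d) d0).get? k = some v → k < w → v = pvV items k) := by
          intro l
          induction l with
          | nil =>
            intro _ acc d0 hw0 hlow
            refine ⟨?_, ?_, ?_⟩
            · simpa [pvStepA] using hw0
            · intro k _; rfl
            · exact hlow
          | cons it l ihl =>
            intro hsub acc d0 hw0 hlow
            have hitem : it ∈ items := hsub it (List.mem_cons_self ..)
            have h0 : 0 ≤ it.1 := hP0 it hitem
            simp only [List.foldl_cons]
            by_cases hle : it.1 ≤ w
            · rw [if_pos hle]
              by_cases h1 : 1 ≤ it.1
              case neg =>
                -- it.1 = 0: the memoised call returns the in-progress entry for w itself,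
                -- and a price ≤ 0 never strictly improves it, so the step is a no-op
                have hz : it.1 = 0 := by omega
                have hp2 : it.2 ≤ 0 := hPz it hitem hz
                rw [hz, sub_zero, pvAfind_memo items fu w d0 acc hw0]
                have hgd : d0.getD w (0, []) = acc :=
                  PySem.Dict.getD_of_get?_eq_some _ _ hw0
                simp only [hgd]
                rw [if_neg (by omega : ¬ acc.1 < acc.1 + it.2)]
                have hstep : pvStepA (it :: l) (pvV items) w acc = pvStepA l (pvV items) w acc := by
                  simp [pvStepA, show ¬ (1 ≤ it.1 ∧ it.1 ≤ w) from by omega]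
                rw [hstep]
                exact ihl (fun x hx => hsub x (List.mem_cons_of_mem _ hx)) acc d0 hw0 hlow
              case pos =>
              -- recursive call at w - it.1
              have hg : 1 ≤ it.1 ∧ it.1 ≤ w := ⟨h1, hle⟩
              have hrec := ih fu (by omega) (w - it.1) d0 (by omega)
                (by intro k v hk hkle; exact hlow k v hk (by omega))
              obtain ⟨hr1, hrhigh, hrlow⟩ := hrec
              have hrw : (pvAfind items fu (w - it.1) d0).2.get? w = some acc := by
                rw [hrhigh w (by omega)]; exact hw0
              have hgetD : (pvAfind items fu (w - it.1) d0).2.getD w (0, []) = acc :=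
                PySem.Dict.getD_of_get?_eq_some _ _ hrw
              have hlow' : ∀ k v, (pvAfind items fu (w - it.1) d0).2.get? k = some v →
                  k < w → v = pvV items k := by
                intro k v hk hklt
                by_cases hk2 : k ≤ w - it.1
                · exact hrlow k v hk hk2
                · rw [hrhigh k (by omega)] at hk
                  exact hlow k v hk hklt
              rw [hgetD, hr1]
              by_cases hcmp : acc.1 < (pvV items (w - it.1)).1 + it.2
              · rw [if_pos hcmp]
                have hstep : pvStepA (it :: l) (pvV items) w acc =
                    pvStepA l (pvV items) w
                      ((pvV items (w - it.1)).1 + it.2, (pvV items (w - it.1)).2 ++ [it]) := by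
                  simp [pvStepA, hg, hcmp]
                rw [hstep]
                have := ihl (fun x hx => hsub x (List.mem_cons_of_mem _ hx))
                  ((pvV items (w - it.1)).1 + it.2, (pvV items (w - it.1)).2 ++ [it])
                  ((pvAfind items fu (w - it.1) d0).2.insert w
                    ((pvV items (w - it.1)).1 + it.2, (pvV items (w - it.1)).2 ++ [it]))
                  (PySem.Dict.get?_insert_self _ _ _)
                  (by
                    intro k v hk hklt
                    rw [PySem.Dict.get?_insert_of_ne _ _ (by omega)] at hk
                    exact hlow' k v hk hklt)
                refine ⟨this.1, ?_, this.2.2⟩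
                intro k hk
                rw [this.2.1 k hk, PySem.Dict.get?_insert_of_ne _ _ (by omega),
                  hrhigh k (by omega)]
              · rw [if_neg hcmp]
                have hstep : pvStepA (it :: l) (pvV items) w acc = pvStepA l (pvV items) w acc := by
                  simp [pvStepA, hg, hcmp]
                rw [hstep]
                have := ihl (fun x hx => hsub x (List.mem_cons_of_mem _ hx)) acc
                  (pvAfind items fu (w - it.1) d0).2 hrw hlow'
                refine ⟨this.1, ?_, this.2.2⟩
                intro k hk
                rw [this.2.1 k hk, hrhigh k (by omega)]
            · -- item does not fit: both the dict step and the pure step skip it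
              rw [if_neg hle]
              have hstep : pvStepA (it :: l) (pvV items) w acc = pvStepA l (pvV items) w acc := by
                simp [pvStepA, show ¬ (1 ≤ it.1 ∧ it.1 ≤ w) from fun hgg => hle hgg.2]
              rw [hstep]
              exact ihl (fun x hx => hsub x (List.mem_cons_of_mem _ hx)) acc d0 hw0 hlow
        have hins := inner items (fun _ h => h) (0, [])
          (d.insert w (0, []))
          (PySem.Dict.get?_insert_self _ _ _)
          (by
            intro k v hk hklt
            rw [PySem.Dict.get?_insert_of_ne _ _ (by omega)] at hk
            exact hd k v hk (by omega))
        obtain ⟨hfw, hfhigh, hflow⟩ := hins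
        have hVw : pvStepA items (pvV items) w (0, []) = pvV items w := (pvV_eq items w).symm
        rw [hVw] at hfw
        refine ⟨PySem.Dict.getD_of_get?_eq_some _ _ hfw, ?_, ?_⟩
        · intro k hk
          rw [hfhigh k hk, PySem.Dict.get?_insert_of_ne _ _ (by omega)]
        · intro k v hk hkle
          by_cases hkw : k = w
          · subst hkw; rw [hfw] at hk; exact (Option.some_inj.mp hk).symm
          · exact hflow k v hk (by omega)

-- ===== B-side: worklist reachability, then the sorted table loop =====
-- B's pure inner fold over the items, using the true DP values
def pvStepB (items : List (Int × Int)) (f : Int → Int) (w : Int)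
    (init : Int × Option (Int × Int)) : Int × Option (Int × Int) :=
  items.foldl (fun acc item =>
    if 1 ≤ item.1 ∧ item.1 ≤ w then
      let cand := f (w - item.1) + item.2
      if acc.1 < cand then (cand, some item) else acc
    else acc) init

def pvC (items : List (Int × Int)) (w : Int) : Int × Option (Int × Int) :=
  pvStepB items (fun x => (pvV items x).1) w (0, none)

-- relation between A's (price, list) accumulator and B's (price, choice) accumulator
def pvRel (items : List (Int × Int)) (w : Int) (a : Int × List (Int × Int))
    (b : Int × Option (Int × Int)) : Prop :=
  a.1 = b.1 ∧
  (b.2 = none → a = (0, [])) ∧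
  (∀ it, b.2 = some it → it ∈ items ∧ 1 ≤ it.1 ∧ it.1 ≤ w ∧
    a = ((pvV items (w - it.1)).1 + it.2, (pvV items (w - it.1)).2 ++ [it]))

lemma pvStep_rel (items : List (Int × Int)) (w : Int) :
    ∀ (l : List (Int × Int)), (∀ it ∈ l, it ∈ items) →
    ∀ a b, pvRel items w a b →
    pvRel items w (pvStepA l (pvV items) w a) (pvStepB l (fun x => (pvV items x).1) w b) := by
  intro l
  induction l with
  | nil => intro _ a b h; simpa [pvStepA, pvStepB] using h
  | cons it l ihl =>
    intro hsub a b hab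
    have hitem : it ∈ items := hsub it (List.mem_cons_self ..)
    have hAB : pvStepA (it :: l) (pvV items) w a =
        pvStepA l (pvV items) w (if 1 ≤ it.1 ∧ it.1 ≤ w then
          (if a.1 < (pvV items (w - it.1)).1 + it.2 then
            ((pvV items (w - it.1)).1 + it.2, (pvV items (w - it.1)).2 ++ [it]) else a) else a) := by
      by_cases hg : 1 ≤ it.1 ∧ it.1 ≤ w <;> simp [pvStepA, List.foldl_cons, hg]
    have hBB : pvStepB (it :: l) (fun x => (pvV items x).1) w b =
        pvStepB l (fun x => (pvV items x).1) w (if 1 ≤ it.1 ∧ it.1 ≤ w then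
          (if b.1 < (pvV items (w - it.1)).1 + it.2 then
            ((pvV items (w - it.1)).1 + it.2, some it) else b) else b) := by
      by_cases hg : 1 ≤ it.1 ∧ it.1 ≤ w <;> simp [pvStepB, List.foldl_cons, hg]
    rw [hAB, hBB]
    apply ihl (fun x hx => hsub x (List.mem_cons_of_mem _ hx))
    by_cases hg : 1 ≤ it.1 ∧ it.1 ≤ w
    · rw [if_pos hg, if_pos hg, hab.1]
      by_cases hcmp : b.1 < (pvV items (w - it.1)).1 + it.2
      · rw [if_pos hcmp, if_pos hcmp]
        exact ⟨rfl, by simp, by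
          intro it' h'
          obtain rfl : it = it' := by simpa using h'
          exact ⟨hitem, hg.1, hg.2, rfl⟩⟩
      · rw [if_neg hcmp, if_neg hcmp]; exact hab
    · rw [if_neg hg, if_neg hg]; exact hab

lemma pvV_rel (items : List (Int × Int)) (w : Int) :
    pvRel items w (pvV items w) (pvC items w) := by
  rw [pvV_eq items w]
  exact pvStep_rel items w items (fun _ h => h) (0, []) (0, none)
    ⟨rfl, fun _ => rfl, by simp⟩

-- a Nodup list of capacities, each equal to W or inside [0, W), has at most W.toNat+1 elements
lemma pvSeen_cap (W : Int) (seen : List Int) (hnd : seen.Nodup)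
    (hbd : ∀ x ∈ seen, x = W ∨ (0 ≤ x ∧ x < W)) : seen.length ≤ W.toNat + 1 := by
  have hsub : seen ⊆ (W :: PySem.List.pyRange 0 W 1) := by
    intro x hx
    rcases hbd x hx with h | h
    · exact h ▸ List.mem_cons_self ..
    · exact List.mem_cons_of_mem _ ((PySem.List.mem_pyRange_one).2 ⟨h.1, h.2⟩)
  have := (List.subperm_of_subset hnd hsub).length_le
  simpa [PySem.List.length_pyRange_one] using this

-- the worklist computes a set of capacities that is closed under removing one fitting item
lemma pvBreach_main (items : List (Int × Int)) (W : Int) :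
    ∀ (fuel : Nat) (stack : List Int) (seen : PySem.Set Int),
    seen.Nodup →
    (∀ x ∈ seen, x = W ∨ (0 ≤ x ∧ x < W)) →
    (∀ x ∈ stack, x ∈ seen) →
    (∀ x ∈ seen, x ∈ stack ∨ ∀ it ∈ items, 1 ≤ it.1 → it.1 ≤ x → x - it.1 ∈ seen) →
    ((stack.length : Int) + 2 * ((W.toNat : Int) + 1 - seen.length) < (fuel : Int)) →
    (∀ x ∈ seen, x ∈ pvBreach items fuel stack seen) ∧
    (pvBreach items fuel stack seen).Nodup ∧
    (∀ x ∈ pvBreach items fuel stack seen, ∀ it ∈ items, 1 ≤ it.1 → it.1 ≤ x →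
      x - it.1 ∈ pvBreach items fuel stack seen) := by
  intro fuel
  induction fuel using Nat.strong_induction_on with
  | _ fuel ih =>
    intro stack seen hnd hbd hsub hcl hfuel
    have hcap : seen.length ≤ W.toNat + 1 := pvSeen_cap W seen hnd hbd
    cases fuel with
    | zero => omega
    | succ fu =>
      by_cases hst : stack = []
      · simp only [pvBreach, dif_pos hst]
        refine ⟨fun x hx => hx, hnd, ?_⟩
        intro x hx it hit h1 hle
        rcases hcl x hx with h | h
        · rw [hst] at h; cases h
        · exact h it hit h1 hle
      · simp only [pvBreach, dif_neg hst]
        set w := stack.getLast hst with hw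
        have hwseen : w ∈ seen := hsub w (List.getLast_mem hst)
        have hwbd : w = W ∨ (0 ≤ w ∧ w < W) := hbd w hwseen
        -- the inner fold over the items
        have hfold : ∀ (l : List (Int × Int)) (st : List Int × PySem.Set Int),
            st.2.Nodup →
            (∀ x ∈ st.2, x = W ∨ (0 ≤ x ∧ x < W)) →
            (∀ x ∈ st.1, x ∈ st.2) →
            let r := l.foldl (fun (st : List Int × PySem.Set Int) item =>
              if 1 ≤ item.1 ∧ item.1 ≤ w ∧ st.2.contains (w - item.1) = false then
                (st.1 ++ [w - item.1], st.2.add (w - item.1))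
              else st) st
            (∀ x ∈ st.2, x ∈ r.2) ∧ (∀ x ∈ st.1, x ∈ r.1) ∧
            r.2.Nodup ∧ (∀ x ∈ r.2, x = W ∨ (0 ≤ x ∧ x < W)) ∧
            (∀ x ∈ r.1, x ∈ r.2) ∧
            (∀ x ∈ r.2, x ∈ st.2 ∨ x ∈ r.1) ∧
            (∀ it ∈ l, 1 ≤ it.1 → it.1 ≤ w → w - it.1 ∈ r.2) ∧
            ((r.1.length : Int) + 2 * ((W.toNat : Int) + 1 - r.2.length) ≤
              (st.1.length : Int) + 2 * ((W.toNat : Int) + 1 - st.2.length)) := by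
          intro l
          induction l with
          | nil =>
            intro st h1 h2 h3
            exact ⟨fun x hx => hx, fun x hx => hx, h1, h2, h3, fun x hx => Or.inl hx,
              by intro it hit; simp at hit, le_rfl⟩
          | cons it l ihl =>
            intro st h1 h2 h3
            by_cases hg : 1 ≤ it.1 ∧ it.1 ≤ w ∧ st.2.contains (w - it.1) = false
            · simp only [List.foldl_cons, if_pos hg]
              have hnew : w - it.1 ∉ st.2 := by
                intro hmem
                rw [(PySem.Set.contains_iff st.2 (w - it.1)).2 hmem] at hg
                exact absurd hg.2.2 (by simp)
              have hnd' : (st.2.add (w - it.1)).Nodup := PySem.Set.nodup_add st.2 _ h1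
              have hbd' : ∀ x ∈ st.2.add (w - it.1), x = W ∨ (0 ≤ x ∧ x < W) := by
                intro x hx
                rcases (PySem.Set.mem_add st.2 _ x).1 hx with hx' | hx'
                · exact h2 x hx'
                · right; subst hx'; constructor
                  · omega
                  · rcases hwbd with h | h <;> omega
              have hsub' : ∀ x ∈ st.1 ++ [w - it.1], x ∈ st.2.add (w - it.1) := by
                intro x hx
                rw [PySem.Set.mem_add]
                rcases List.mem_append.1 hx with hx' | hx'
                · exact Or.inl (h3 x hx')
                · exact Or.inr (by simpa using hx')
              have := ihl (st.1 ++ [w - it.1], st.2.add (w - it.1)) hnd' hbd' hsub'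
              obtain ⟨c1, c2, c3, c4, c5, c6, c7, c8⟩ := this
              refine ⟨?_, ?_, c3, c4, c5, ?_, ?_, ?_⟩
              · intro x hx; exact c1 x ((PySem.Set.mem_add st.2 _ x).2 (Or.inl hx))
              · intro x hx; exact c2 x (List.mem_append_left _ hx)
              · intro x hx
                rcases c6 x hx with hx' | hx'
                · rcases (PySem.Set.mem_add st.2 _ x).1 hx' with h | h
                  · exact Or.inl h
                  · exact Or.inr (c2 x (List.mem_append_right _ (by simpa using h)))
                · exact Or.inr hx'
              · intro it' hit' hi1 hi2
                rcases List.mem_cons.1 hit' with rfl | hit'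
                · exact c1 _ ((PySem.Set.mem_add st.2 _ _).2 (Or.inr rfl))
                · exact c7 it' hit' hi1 hi2
              · -- one discovery: stack +1, seen +1 (strictly below the cap)
                have hlen : (st.2.add (w - it.1)).length = st.2.length + 1 := by
                  unfold PySem.Set.add
                  rw [if_neg (by
                    intro hc
                    exact absurd ((PySem.Set.contains_iff st.2 (w - it.1)).1 hc) hnew)]
                  simp
                have hcap' : (st.2.add (w - it.1)).length ≤ W.toNat + 1 :=
                  pvSeen_cap W _ hnd' hbd'
                have := c8
                simp only [List.length_append, List.length_singleton, hlen] at this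
                push_cast at this ⊢
                omega
            · simp only [List.foldl_cons, if_neg hg]
              have := ihl st h1 h2 h3
              obtain ⟨c1, c2, c3, c4, c5, c6, c7, c8⟩ := this
              refine ⟨c1, c2, c3, c4, c5, c6, ?_, c8⟩
              intro it' hit' hi1 hi2
              rcases List.mem_cons.1 hit' with rfl | hit'
              · -- the guard failed although the item fits: w - it'.1 was already seen
                have hc : st.2.contains (w - it'.1) = true := by
                  cases hcc : st.2.contains (w - it'.1) with
                  | false => exact absurd ⟨hi1, hi2, hcc⟩ hg
                  | true => rfl
                exact c1 _ ((PySem.Set.contains_iff st.2 _).1 hc)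
              · exact c7 it' hit' hi1 hi2
        have hstack : stack = stack.dropLast ++ [w] := (List.dropLast_concat_getLast hst).symm
        have hsub0 : ∀ x ∈ stack.dropLast, x ∈ seen := fun x hx =>
          hsub x (by rw [hstack]; exact List.mem_append_left _ hx)
        obtain ⟨c1, c2, c3, c4, c5, c6, c7, c8⟩ :=
          hfold items (stack.dropLast, seen) hnd hbd hsub0
        set r := items.foldl (fun (st : List Int × PySem.Set Int) item =>
          if 1 ≤ item.1 ∧ item.1 ≤ w ∧ st.2.contains (w - item.1) = false then
            (st.1 ++ [w - item.1], st.2.add (w - item.1))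
          else st) (stack.dropLast, seen) with hr
        have hcl' : ∀ x ∈ r.2, x ∈ r.1 ∨ ∀ it ∈ items, 1 ≤ it.1 → it.1 ≤ x → x - it.1 ∈ r.2 := by
          intro x hx
          rcases c6 x hx with hx' | hx'
          · rcases hcl x hx' with hs | hs
            · rw [hstack] at hs
              rcases List.mem_append.1 hs with hs | hs
              · exact Or.inl (c2 x hs)
              · obtain rfl : x = w := by simpa using hs
                exact Or.inr c7
            · exact Or.inr (fun it hit h1' h2' => c1 _ (hs it hit h1' h2'))
          · exact Or.inl hx'
        have hlen0 : stack.length = stack.dropLast.length + 1 := by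
          conv_lhs => rw [hstack]
          simp
        have hmeas : (r.1.length : Int) + 2 * ((W.toNat : Int) + 1 - r.2.length) < (fu : Int) := by
          have := c8
          push_cast at this hfuel ⊢
          omega
        obtain ⟨d1, d2, d3⟩ := ih fu (by omega) r.1 r.2 c3 c4 c5 hcl' hmeas
        exact ⟨fun x hx => d1 x (c1 x hx), d2, d3⟩

-- the sorted DP loop: every reachable capacity gets its true value and parent pointer
lemma pvBtables_main (items : List (Int × Int)) (R : List Int)
    (hRcl : ∀ x ∈ R, ∀ it ∈ items, 1 ≤ it.1 → it.1 ≤ x → x - it.1 ∈ R) :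
    ∀ (ws : List Int), (∀ x ∈ ws, x ∈ R) → ws.Pairwise (· < ·) →
    ∀ (best : PySem.Dict Int Int) (choice : PySem.Dict Int (Option (Int × Int))),
    (∀ k ∈ R, k ∈ ws ∨ (best.get? k = some (pvV items k).1 ∧ choice.get? k = some (pvC items k).2)) →
    ∀ k ∈ R,
      (ws.foldl (fun td w =>
        let bc := items.foldl (fun (acc : Int × Option (Int × Int)) item =>
          if 1 ≤ item.1 ∧ item.1 ≤ w then
            let cand := td.1.getD (w - item.1) 0 + item.2
            if acc.1 < cand then (cand, some item) else acc
          else acc) (0, none)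
        (td.1.insert w bc.1, td.2.insert w bc.2)) (best, choice)).1.get? k
          = some (pvV items k).1 ∧
      (ws.foldl (fun td w =>
        let bc := items.foldl (fun (acc : Int × Option (Int × Int)) item =>
          if 1 ≤ item.1 ∧ item.1 ≤ w then
            let cand := td.1.getD (w - item.1) 0 + item.2
            if acc.1 < cand then (cand, some item) else acc
          else acc) (0, none)
        (td.1.insert w bc.1, td.2.insert w bc.2)) (best, choice)).2.get? k
          = some (pvC items k).2 := by
  intro ws
  induction ws with
  | nil =>
    intro _ _ best choice hinv k hk
    rcases hinv k hk with h | h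
    · cases h
    · exact h
  | cons w tl ihw =>
    intro hsubR hpw best choice hinv k hk
    have hwR : w ∈ R := hsubR w (List.mem_cons_self ..)
    have htl : ∀ x ∈ tl, w < x := by
      intro x hx
      exact (List.pairwise_cons.1 hpw).1 x hx
    -- the inner fold equals the pure step over the true values
    have hbc : items.foldl (fun (acc : Int × Option (Int × Int)) item =>
        if 1 ≤ item.1 ∧ item.1 ≤ w then
          let cand := best.getD (w - item.1) 0 + item.2
          if acc.1 < cand then (cand, some item) else acc
        else acc) (0, none) = pvC items w := by
      unfold pvC pvStepB
      apply PySem.List.foldl_congr_mem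
      intro acc x hx
      by_cases hg : 1 ≤ x.1 ∧ x.1 ≤ w
      · have hcR : w - x.1 ∈ R := hRcl w hwR x hx hg.1 hg.2
        have hclt : w - x.1 < w := by omega
        have hcval : best.get? (w - x.1) = some (pvV items (w - x.1)).1 := by
          rcases hinv (w - x.1) hcR with h | h
          · rcases List.mem_cons.1 h with h' | h'
            · omega
            · exact absurd (htl _ h') (by omega)
          · exact h.1
        have : best.getD (w - x.1) 0 = (pvV items (w - x.1)).1 :=
          PySem.Dict.getD_of_get?_eq_some _ _ hcval
        simp only [if_pos hg, this]
      · simp only [if_neg hg]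
    simp only [List.foldl_cons, hbc]
    refine ihw (fun x hx => hsubR x (List.mem_cons_of_mem _ hx))
      (List.pairwise_cons.1 hpw).2 (best.insert w (pvC items w).1)
      (choice.insert w (pvC items w).2) ?_ k hk
    intro k' hk'
    by_cases hkw : k' = w
    · subst hkw
      right
      rw [PySem.Dict.get?_insert_self, PySem.Dict.get?_insert_self]
      have h1 : (pvC items k').1 = (pvV items k').1 := (pvV_rel items k').1.symm
      exact ⟨by rw [h1], rfl⟩
    · rw [PySem.Dict.get?_insert_of_ne _ _ hkw, PySem.Dict.get?_insert_of_ne _ _ hkw]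
      rcases hinv k' hk' with h | h
      · rcases List.mem_cons.1 h with h' | h'
        · exact absurd h' hkw
        · exact Or.inl h'
      · exact Or.inr h

-- the reconstruction loop returns A's reversed optimal list
lemma pvBrebuild_eq (items : List (Int × Int)) (R : List Int)
    (hRcl : ∀ x ∈ R, ∀ it ∈ items, 1 ≤ it.1 → it.1 ≤ x → x - it.1 ∈ R)
    (choice : PySem.Dict Int (Option (Int × Int)))
    (hch : ∀ k ∈ R, choice.get? k = some (pvC items k).2) :
    ∀ fuel (w : Int), w ∈ R → w.toNat < fuel →
    pvBrebuild choice fuel w = (pvV items w).2.reverse := by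
  intro fuel
  induction fuel using Nat.strong_induction_on with
  | _ fuel ih =>
    intro w hwR hwf
    cases fuel with
    | zero => omega
    | succ fu =>
      have hchoice : choice.getD w none = (pvC items w).2 :=
        PySem.Dict.getD_of_get?_eq_some _ _ (hch w hwR)
      have hrel := pvV_rel items w
      cases hc : (pvC items w).2 with
      | none =>
        have : pvV items w = (0, []) := hrel.2.1 hc
        simp only [pvBrebuild, hchoice, hc, this]
        rfl
      | some it =>
        obtain ⟨hitem, h1, hle, hVw⟩ := hrel.2.2 it hc
        simp only [pvBrebuild, hchoice, hc]
        rw [ih fu (by omega) (w - it.1) (hRcl w hwR it hitem h1 hle) (by omega), hVw]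
        simp

-- B computes the reversed optimal list, with no precondition at all
lemma pvB_value (items : List (Int × Int)) (weight : Int) :
    find_with_repeats_recursive_alt items weight = (pvV items weight).2.reverse := by
  unfold find_with_repeats_recursive_alt
  have hseen0 : (PySem.Set.ofList [weight] : PySem.Set Int) = [weight] := rfl
  have hmain := pvBreach_main items weight (2 * (weight.toNat + 1) + 1) [weight]
    (PySem.Set.ofList [weight])
    (by rw [hseen0]; exact List.nodup_singleton _)
    (by rw [hseen0]; intro x hx; left; simpa using hx)
    (by rw [hseen0]; intro x hx; simpa using hx)
    (by rw [hseen0]; intro x hx; left; simpa using hx)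
    (by rw [hseen0]; push_cast; simp; omega)
  set R := pvBreach items (2 * (weight.toNat + 1) + 1) [weight] (PySem.Set.ofList [weight])
    with hR
  obtain ⟨hmono, hRnd, hRcl⟩ := hmain
  have hwR : weight ∈ R := hmono weight (by rw [hseen0]; simp)
  -- sorted(seen): a permutation of R, strictly increasing
  set ws := PySem.List.sorted R (fun x => x) false with hws
  have hperm : ws.Perm R := PySem.List.sorted_perm R (fun x => x) false
  have hwsnd : ws.Nodup := hperm.nodup_iff.2 hRnd
  have hwsle : ws.Pairwise (· ≤ ·) := PySem.List.sorted_pairwise R (fun x => x)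
  have hwslt : ws.Pairwise (· < ·) := by
    have := List.Pairwise.and hwsle hwsnd
    exact this.imp (fun h => lt_of_le_of_ne h.1 h.2)
  have htab := pvBtables_main items R hRcl ws (fun x hx => hperm.mem_iff.1 hx) hwslt
    PySem.Dict.empty PySem.Dict.empty
    (fun k hk => Or.inl (hperm.mem_iff.2 hk))
  exact pvBrebuild_eq items R hRcl _ (fun k hk => (htab k hk).2) (weight.toNat + 1)
    weight hwR (by omega)

-- ===== assembling the two sides =====
lemma pvA_value (items : List (Int × Int)) (hP0 : ∀ p ∈ items, 0 ≤ p.1)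
    (hPz : ∀ p ∈ items, p.1 = 0 → p.2 ≤ 0) (weight : Int) :
    find_with_repeats_recursive items weight = (pvV items weight).2.reverse := by
  unfold find_with_repeats_recursive
  have := pvA_main items hP0 hPz (weight.toNat + 1) weight PySem.Dict.empty (by omega)
    (by intro k v hk; simp [PySem.Dict.get?_empty] at hk)
  rw [this.1]

-- with a negative capacity no item ever fits (inside Pre_), and A returns [] at once
lemma pvA_neg (items : List (Int × Int)) (weight : Int) (hw : weight < 0)
    (hPre : ∀ p ∈ items, 0 ≤ p.1 ∨ weight < p.1) :
    find_with_repeats_recursive items weight = [] := by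
  unfold find_with_repeats_recursive
  rw [show weight.toNat + 1 = 1 from by omega]
  have hnone : PySem.Dict.get? (PySem.Dict.empty : PySem.Dict Int (Int × List (Int × Int))) weight
      = none := PySem.Dict.get?_empty _
  simp only [pvAfind, hnone]
  have hfold : ∀ (l : List (Int × Int)), (∀ it ∈ l, it ∈ items) →
      ∀ d0 : PySem.Dict Int (Int × List (Int × Int)),
      (l.foldl (fun d item =>
        if item.1 ≤ weight then
          if (d.getD weight (0, [])).1 < (d.getD (weight - item.1) (0, [])).1 + item.2 then
            d.insert weight
              ((d.getD (weight - item.1) (0, [])).1 + item.2,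
               (d.getD (weight - item.1) (0, [])).2 ++ [item])
          else d
        else d) d0) = d0 := by
    intro l
    induction l with
    | nil => intro _ d0; rfl
    | cons it l ihl =>
      intro hsub d0
      have := hPre it (hsub it (List.mem_cons_self ..))
      have hle : ¬ it.1 ≤ weight := by omega
      simp only [List.foldl_cons, if_neg hle]
      exact ihl (fun x hx => hsub x (List.mem_cons_of_mem _ hx)) d0
  rw [hfold items (fun _ h => h)]
  rw [PySem.Dict.getD_insert_self]
  rfl

theorem pv_equiv (items : List (Int × Int)) (weight : Int)
    (hPre : ∀ p ∈ items, (0 ≤ p.1 ∨ weight < p.1) ∧ (p.1 = 0 → p.2 ≤ 0)) :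
    find_with_repeats_recursive items weight = find_with_repeats_recursive_alt items weight := by
  rw [pvB_value items weight]
  by_cases hneg : weight < 0
  · rw [pvA_neg items weight hneg (fun p hp => (hPre p hp).1),
      pvV_nonpos items weight (by omega)]
    rfl
  · have hP0 : ∀ p ∈ items, 0 ≤ p.1 := by
      intro p hp
      rcases (hPre p hp).1 with h | h
      · exact h
      · omega
    have hPz : ∀ p ∈ items, p.1 = 0 → p.2 ≤ 0 := fun p hp => (hPre p hp).2
    exact pvA_value items hP0 hPz weight

-- ===== VERDICT (by name: the statement is the Claim_ definition above) =====
theorem find_with_repeats_recursive_spec : Claim_equal_find_with_repeats_recursive := by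
  intro items weight _ hPre
  unfold Spec_find_with_repeats_recursive
  exact pv_equiv items weight hPre
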